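-- pv_equiv track=rewrite | github.com/developedby/2b1q-transmitter | codec2b1q.py | encode2b1q
-- ===== SOURCE A (Python) =====
-- def encode2b1q(bin_data):
--     coded_data = []
--     for i in range(len(bin_data)):
--         if i % 2:
--             '''if bin_data[i-1] == 0 and bin_data[i] == 0:
--                 coded_data.append(+1)
--             elif bin_data[i-1] == 0 and bin_data[i] == 1:
--                 coded_data.append(+3)
--             elif bin_data[i-1] == 1 and bin_data[i] == 0:
--                 coded_data.append(-1)
--             elif bin_data[i-1] == 1 and bin_data[i] == 1:
--                 coded_data.append(-3)
--             else:
--                 raise Exception("Encoding Error: Data given not binary. \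
-- %s or %s not '1' or '0'. Full data: %s" %(bin_data[i-1], bin_data[i], bin_data))'''
--             # Does the same as the code above
--             coded_data.append(1 + 2*bin_data[i])
--             if bin_data[i-1]:
--                 coded_data[int(i/2)] = -coded_data[int(i/2)]
--
--             # If previous level negative, invert the first bit
--             if i >= 2 and coded_data[int(i/2)-1] < 0:
--                 coded_data[int(i/2)] = -coded_data[int(i/2)]
--     return coded_data
-- ===== SOURCE B (Python) =====
-- def encode2b1q(bin_data):
--     n = len(bin_data) // 2
--     base = []
--     for j in range(n):
--         v = 1 + 2 * bin_data[2 * j + 1]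
--         if bin_data[2 * j]:
--             v = -v
--         base.append(v)
--     out = []
--     prev = 1
--     for v in base:
--         if prev < 0:
--             v = -v
--         out.append(v)
--         prev = v
--     return out
-- ===== Notes on version B (the rewrite author's own statement) =====
-- stated objective: simpler
-- what changed: Replaces A's single loop over all indices with in-place indexed mutation of the output (append, then two conditional sign-flips via coded[int(i/2)] assignments) by two clean passes over bit pairs: first build the base symbol for each pair, then apply the differential sign correction tracking the previous emitted symbol in a local variable instead of re-indexing the output list.
import Mathlib
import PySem

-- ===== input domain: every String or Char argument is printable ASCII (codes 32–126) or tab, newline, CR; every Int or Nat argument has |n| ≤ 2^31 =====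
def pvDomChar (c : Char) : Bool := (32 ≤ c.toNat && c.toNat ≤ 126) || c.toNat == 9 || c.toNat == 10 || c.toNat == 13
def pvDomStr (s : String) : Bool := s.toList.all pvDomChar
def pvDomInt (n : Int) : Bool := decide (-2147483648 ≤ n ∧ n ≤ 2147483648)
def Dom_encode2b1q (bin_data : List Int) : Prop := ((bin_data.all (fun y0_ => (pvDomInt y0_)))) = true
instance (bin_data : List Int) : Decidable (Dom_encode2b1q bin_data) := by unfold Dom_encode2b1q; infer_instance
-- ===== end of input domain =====

-- B replaces A's single index loop with indexed mutation of the output by two passes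
-- (build base symbols per pair, then apply the sign correction with a 'prev' accumulator): simpler, same cost.

-- ===== PORT A =====
-- A's loop body for index i (odd i appends and possibly sign-flips the last slot twice).
def encode2b1qStep (bin_data : List Int) (coded : List Int) (i : Nat) : List Int :=
  if i % 2 = 1 then
    let j := i / 2
    let coded := coded ++ [1 + 2 * bin_data.getD i 0]
    let coded := if bin_data.getD (i - 1) 0 ≠ 0 then coded.set j (-(coded.getD j 0)) else coded
    if 2 ≤ i ∧ coded.getD (j - 1) 0 < 0 then coded.set j (-(coded.getD j 0)) else coded
  else coded

def encode2b1q (bin_data : List Int) : List Int :=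
  (List.range bin_data.length).foldl (encode2b1qStep bin_data) []

-- ===== PORT B =====
-- base symbol for pair j (first pass of Source B)
def encode2b1qBase (bin_data : List Int) (j : Nat) : Int :=
  let v := 1 + 2 * bin_data.getD (2 * j + 1) 0
  if bin_data.getD (2 * j) 0 ≠ 0 then -v else v

-- second pass of Source B: correct signs tracking the previous emitted symbol
def encode2b1qFix (st : List Int × Int) (v : Int) : List Int × Int :=
  let v := if st.2 < 0 then -v else v
  (st.1 ++ [v], v)

def encode2b1q_alt (bin_data : List Int) : List Int :=
  let n := bin_data.length / 2
  let base := (List.range n).map (encode2b1qBase bin_data)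
  (base.foldl encode2b1qFix ([], 1)).1

-- ===== PRECONDITION & SPEC =====
def Spec_encode2b1q (bin_data : List Int) (out : List Int) : Prop := out = encode2b1q_alt bin_data
instance (bin_data : List Int) (out : List Int) : Decidable (Spec_encode2b1q bin_data out) := by unfold Spec_encode2b1q; infer_instance

-- ===== CLAIM (what is proved, stated in full; the proofs are below) =====
def Claim_equal_encode2b1q : Prop := ∀ (bin_data : List Int), Dom_encode2b1q bin_data → Spec_encode2b1q bin_data (encode2b1q bin_data)

-- ===== LEMMAS AND PROOFS =====

-- B's second-pass fold state after n pairs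
def fixState (bin_data : List Int) (n : Nat) : List Int × Int :=
  (((List.range n).map (encode2b1qBase bin_data)).foldl encode2b1qFix ([], 1))

theorem main_invariant (bin_data : List Int) (n : Nat) :
    (List.range (2 * n)).foldl (encode2b1qStep bin_data) [] = (fixState bin_data n).1 ∧
    (fixState bin_data n).1.length = n ∧
    (n = 0 → (fixState bin_data n).2 = 1) ∧
    (1 ≤ n → (fixState bin_data n).2 = (fixState bin_data n).1.getD (n - 1) 0) := by
  induction n with
  | zero => simp [fixState]
  | succ n ih =>
    obtain ⟨hA, hlen, h0, h1⟩ := ih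
    rcases hst : fixState bin_data n with ⟨acc, prev⟩
    rw [hst] at hA hlen h0 h1
    simp only at hA hlen h0 h1
    have hfix : fixState bin_data (n + 1) =
        encode2b1qFix (acc, prev) (encode2b1qBase bin_data n) := by
      rw [← hst]; simp [fixState, List.range_succ]
    have hrange : List.range (2 * (n + 1)) = List.range (2 * n) ++ [2 * n, 2 * n + 1] := by
      have : 2 * (n + 1) = (2 * n + 1) + 1 := by ring
      rw [this, List.range_succ, List.range_succ]
      simp
    have hfoldA : (List.range (2 * (n + 1))).foldl (encode2b1qStep bin_data) []
        = encode2b1qStep bin_data acc (2 * n + 1) := by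
      rw [hrange, List.foldl_append]
      simp only [List.foldl_cons, List.foldl_nil, hA]
      have : encode2b1qStep bin_data acc (2 * n) = acc := by
        simp [encode2b1qStep, Nat.mul_mod_right]
      rw [this]
    have hj : (2 * n + 1) / 2 = n := by omega
    have hmod : (2 * n + 1) % 2 = 1 := by omega
    have hsetget : ∀ (x : Int), (acc ++ [x]).getD n 0 = x := by
      intro x
      rw [List.getD_eq_getElem?_getD, List.getElem?_append_right (by omega)]
      simp [hlen]
    have hset : ∀ (x y : Int), (acc ++ [x]).set n y = acc ++ [y] := by
      intro x y
      rw [List.set_append]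
      simp [hlen]
    have hbase : (if bin_data.getD (2 * n + 1 - 1) 0 ≠ 0 then
          (acc ++ [1 + 2 * bin_data.getD (2 * n + 1) 0]).set n
            (-( (acc ++ [1 + 2 * bin_data.getD (2 * n + 1) 0]).getD n 0))
        else acc ++ [1 + 2 * bin_data.getD (2 * n + 1) 0])
        = acc ++ [encode2b1qBase bin_data n] := by
      simp only [encode2b1qBase]
      have h2 : 2 * n + 1 - 1 = 2 * n := by omega
      rw [h2]
      split_ifs with h <;> simp_all [hset, hsetget]
    have hstep : encode2b1qStep bin_data acc (2 * n + 1)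
        = (if 2 ≤ 2 * n + 1 ∧ (acc ++ [encode2b1qBase bin_data n]).getD (n - 1) 0 < 0 then
            (acc ++ [encode2b1qBase bin_data n]).set n
              (-( (acc ++ [encode2b1qBase bin_data n]).getD n 0))
          else acc ++ [encode2b1qBase bin_data n]) := by
      simp only [encode2b1qStep, hmod, hj]
      rw [if_pos trivial, hbase]
    by_cases hn : n = 0
    · subst hn
      have hprev := h0 rfl
      have hc : ¬ (2 ≤ 2 * 0 + 1 ∧ (acc ++ [encode2b1qBase bin_data 0]).getD (0 - 1) 0 < 0) := by
        omega
      have hnil : acc = [] := List.eq_nil_of_length_eq_zero hlen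
      subst hnil
      rw [hfoldA, hstep, if_neg hc, hfix]
      simp [encode2b1qFix, hprev]
    · have hn1 : 1 ≤ n := by omega
      have hprev := h1 hn1
      have hgd : (acc ++ [encode2b1qBase bin_data n]).getD (n - 1) 0 = acc.getD (n - 1) 0 := by
        rw [List.getD_eq_getElem?_getD, List.getElem?_append_left (by omega),
          ← List.getD_eq_getElem?_getD]
      have hcond : (2 ≤ 2 * n + 1 ∧ (acc ++ [encode2b1qBase bin_data n]).getD (n - 1) 0 < 0)
          ↔ prev < 0 := by
        rw [hgd, ← hprev]; omega
      rw [hfoldA, hstep, hfix]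
      by_cases hneg : prev < 0
      · rw [if_pos (hcond.mpr hneg), hsetget, hset]
        simp [encode2b1qFix, if_pos hneg, hlen, hsetget]
      · rw [if_neg (fun h => hneg (hcond.mp h))]
        simp [encode2b1qFix, if_neg hneg, hlen, hsetget]

theorem range_odd_noop (bin_data : List Int) (n : Nat) (h : bin_data.length = 2 * n + 1) :
    (List.range bin_data.length).foldl (encode2b1qStep bin_data) []
      = (List.range (2 * n)).foldl (encode2b1qStep bin_data) [] := by
  rw [h, List.range_succ, List.foldl_append]
  simp [encode2b1qStep, Nat.mul_mod_right]

-- ===== VERDICT (by name: the statement is the Claim_ definition above) =====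
theorem encode2b1q_spec : Claim_equal_encode2b1q := by
  intro bin_data _
  unfold Spec_encode2b1q
  suffices h : encode2b1q bin_data = (fixState bin_data (bin_data.length / 2)).1 by
    rw [h]; rfl
  have hmain := (main_invariant bin_data (bin_data.length / 2)).1
  unfold encode2b1q
  rcases Nat.even_or_odd bin_data.length with ⟨k, hk⟩ | ⟨k, hk⟩
  · have hkk : bin_data.length / 2 = k := by omega
    have h2 : bin_data.length = 2 * (bin_data.length / 2) := by omega
    conv_lhs => rw [h2]
    rw [hmain]
  · have h2 : bin_data.length = 2 * (bin_data.length / 2) + 1 := by omega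
    rw [range_odd_noop bin_data _ h2, hmain]
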